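-- pv_equiv track=rewrite | github.com/GiovanniCassani/characters | src/preprocessing/letters.py | loo_features
-- ===== SOURCE A (Python) =====
-- import string
--
-- def count_vector(s):
--
--     """
--     :param s:   string
--     :return:    a list containing counts of how often each English lowercase character occurs in the string
--     """
--
--     alphabet = list(string.ascii_lowercase)
--
--     v = []
--     for i in range(len(alphabet)):
--         v.append(s.lower().count(alphabet[i]))
--     return v
--
-- def loo_features(s):
--
--     d = {}
--     for i in range(len(s)):
--         l = list(s.lower())
--         key = l.pop(i)
--         d[key] = count_vector(''.join(l))
--     d['none'] = count_vector(s)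
--
--     return d
-- ===== SOURCE B (Python) =====
-- import string
--
-- def loo_features(s):
--     t = s.lower()
--     full = [t.count(c) for c in string.ascii_lowercase]
--     d = {}
--     for c in dict.fromkeys(t):
--         p = ord(c) - 97 if 'a' <= c <= 'z' else -1
--         d[c] = [n - 1 if i == p else n for i, n in enumerate(full)]
--     d['none'] = list(full)
--     return d
-- ===== Notes on version B (the rewrite author's own statement) =====
-- stated objective: faster
-- what changed: A recopies and recounts the whole lowered string for every index (26 counts per character); B counts the 26 letters once over the full lowered string and derives each distinct character's leave-one-out vector by decrementing a single cell, iterating over distinct characters via dict.fromkeys.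
import Mathlib
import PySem

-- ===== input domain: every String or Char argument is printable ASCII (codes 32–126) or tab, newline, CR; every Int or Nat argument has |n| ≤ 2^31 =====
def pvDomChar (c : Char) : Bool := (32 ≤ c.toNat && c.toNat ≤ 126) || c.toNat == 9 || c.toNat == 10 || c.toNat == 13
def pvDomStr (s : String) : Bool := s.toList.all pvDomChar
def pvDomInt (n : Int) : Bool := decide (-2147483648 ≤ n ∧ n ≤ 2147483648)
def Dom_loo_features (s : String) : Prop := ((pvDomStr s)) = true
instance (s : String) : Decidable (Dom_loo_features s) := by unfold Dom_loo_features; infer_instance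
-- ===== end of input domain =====

-- B computes the 26-letter count vector of s.lower() once and derives each leave-one-out
-- vector by decrementing a single cell, instead of recounting the whole string per index
-- (objective: faster; return-value equivalence).


-- ===== PORT A =====
def count_vector (s : String) : List Int :=
  let alphabet := "abcdefghijklmnopqrstuvwxyz".toList
  (PySem.List.pyRange 0 (PySem.List.len alphabet) 1).foldl
    (fun v i =>
      v ++ [(PySem.Str.count (PySem.Str.lower s)
               (String.singleton (PySem.List.pyGetD alphabet i 'a')) : Int)]) []

def loo_features (s : String) : List (String × List Int) :=
  let d := (PySem.List.pyRange 0 (PySem.Str.len s) 1).foldl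
    (fun d i =>
      let l := (PySem.Str.lower s).toList
      match PySem.List.pop? l i with
      | some (key, rest) =>
          d.insert (String.singleton key)
            (count_vector (PySem.Str.join "" (rest.map String.singleton)))
      | none => d)
    PySem.Dict.empty
  (d.insert "none" (count_vector s)).items

-- ===== PORT B =====
def loo_features_alt (s : String) : List (String × List Int) :=
  let t := PySem.Str.lower s
  let full : List Int := "abcdefghijklmnopqrstuvwxyz".toList.map
    (fun c => (PySem.Str.count t (String.singleton c) : Int))
  let d := (PySem.List.dedup t.toList).foldl
    (fun d c =>
      let p : Int := if 'a' ≤ c ∧ c ≤ 'z' then (c.toNat : Int) - 97 else -1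
      d.insert (String.singleton c)
        ((PySem.List.enumerate full).map (fun q => if q.1 = p then q.2 - 1 else q.2)))
    PySem.Dict.empty
  (d.insert "none" full).items

-- ===== PRECONDITION & SPEC =====
def Spec_loo_features (s : String) (out : List (String × List Int)) : Prop := out = loo_features_alt s
instance (s : String) (out : List (String × List Int)) : Decidable (Spec_loo_features s out) := by unfold Spec_loo_features; infer_instance

-- ===== CLAIM (what is proved, stated in full; the proofs are below) =====
def Claim_equal_loo_features : Prop := ∀ (s : String), Dom_loo_features s → Spec_loo_features s (loo_features s)

-- ===== LEMMAS AND PROOFS =====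

-- the leave-one-out vector of t with one occurrence of c removed (proof-side value)
def pvG (t : List Char) (c : Char) : List Int :=
  "abcdefghijklmnopqrstuvwxyz".toList.map (fun a => (t.count a : Int) - if a = c then 1 else 0)

-- the insert step both dictionary-building folds reduce to
def pvIns (t : List Char) (d : PySem.Dict String (List Int)) (c : Char) : PySem.Dict String (List Int) :=
  d.insert (String.singleton c) (pvG t c)

-- first-occurrence dedup relative to an already-seen prefix
def pvDdA (seen : List Char) : List Char → List Char
  | [] => []
  | c :: l => if PySem.Set.contains seen c then pvDdA seen l else c :: pvDdA (seen ++ [c]) l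

theorem pvCharLe (c d : Char) : (c ≤ d) ↔ c.toNat ≤ d.toNat := by
  rw [Char.le_def]; exact UInt32.le_iff_toNat_le

theorem pvToNatOfNat (n : Nat) (h : n < 55296) : (Char.ofNat n).toNat = n := by
  rw [Char.toNat_ofNat, if_pos (Or.inl h)]

theorem pvCharExt (c d : Char) (h : c.toNat = d.toNat) : c = d := by
  apply Char.ext; exact UInt32.toNat_inj.mp h

theorem pvSingletonInj (c d : Char) (h : String.singleton c = String.singleton d) : c = d := by
  have := congrArg String.toList h; simpa using this

-- str.count with a single-character needle is the character count
theorem pvGoSingleton (c : Char) : ∀ (fuel : Nat) (l : List Char) (acc : Nat), l.length ≤ fuel →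
    PySem.Chars.count.go [c] fuel l acc = acc + l.count c := by
  intro fuel
  induction fuel with
  | zero => intro l acc h; cases l with
    | nil => simp [PySem.Chars.count.go]
    | cons x t => simp at h
  | succ n ih => intro l acc h; cases l with
    | nil => simp [PySem.Chars.count.go]
    | cons x t =>
      simp only [PySem.Chars.count.go]
      by_cases hx : x = c
      · subst hx
        rw [if_pos (by simp [List.isPrefixOf])]
        simp only [List.length_cons] at h
        rw [ih _ _ (by simpa using h)]
        simp; omega
      · rw [if_neg (by simp [List.isPrefixOf]; exact fun hh => hx hh.symm)]
        simp only [List.length_cons] at h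
        rw [ih _ _ (by omega)]
        simp [hx]

theorem pvCountSingleton (s : List Char) (c : Char) : PySem.Chars.count s [c] = s.count c := by
  rw [PySem.Chars.count]
  simp only [List.isEmpty_cons]
  simpa using pvGoSingleton c s.length s 0 le_rfl

theorem pvIsupperIff (c : Char) : PySem.Chars.isupper c = true ↔ (65 ≤ c.toNat ∧ c.toNat ≤ 90) := by
  unfold PySem.Chars.isupper
  rw [Bool.and_eq_true, decide_eq_true_eq, decide_eq_true_eq, pvCharLe, pvCharLe]
  have h65 : ('A' : Char).toNat = 65 := by decide
  have h90 : ('Z' : Char).toNat = 90 := by decide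
  rw [h65, h90]

theorem pvLowerCharIdem (c : Char) :
    PySem.Chars.lowerChar (PySem.Chars.lowerChar c) = PySem.Chars.lowerChar c := by
  unfold PySem.Chars.lowerChar
  by_cases h : PySem.Chars.isupper c = true
  · rw [if_pos h]
    have hc := (pvIsupperIff c).mp h
    have hv : (Char.ofNat (c.toNat + 32)).toNat = c.toNat + 32 := pvToNatOfNat _ (by omega)
    rw [if_neg (by rw [pvIsupperIff, hv]; omega)]
  · rw [if_neg h, if_neg h]

-- characters of an already-lowered list are fixed by lowering
theorem pvLowerFix (s : List Char) (l : List Char) (hsub : l.Sublist (PySem.Chars.lower s)) :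
    PySem.Chars.lower l = l := by
  unfold PySem.Chars.lower
  apply (List.map_congr_left ?_).trans (List.map_id l)
  intro x hx
  have hx' : x ∈ PySem.Chars.lower s := hsub.mem hx
  unfold PySem.Chars.lower at hx'
  obtain ⟨y, _, rfl⟩ := List.mem_map.mp hx'
  exact pvLowerCharIdem y

-- closed form of count_vector
theorem pvCountVectorEq (s : String) :
    count_vector s = "abcdefghijklmnopqrstuvwxyz".toList.map
      (fun a => ((PySem.Chars.lower s.toList).count a : Int)) := by
  unfold count_vector
  show (PySem.List.pyRange 0 (PySem.List.len "abcdefghijklmnopqrstuvwxyz".toList) 1).foldl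
      (fun v i =>
        v ++ [(PySem.Str.count (PySem.Str.lower s)
                 (String.singleton (PySem.List.pyGetD "abcdefghijklmnopqrstuvwxyz".toList i 'a')) : Int)]) []
    = _
  have hlen : PySem.List.len "abcdefghijklmnopqrstuvwxyz".toList
      = ("abcdefghijklmnopqrstuvwxyz".toList.length : Int) := by decide
  rw [hlen]
  rw [PySem.List.foldl_pyRange_zero_pyGetD' "abcdefghijklmnopqrstuvwxyz".toList 'a'
    (fun v c => v ++ [(PySem.Str.count (PySem.Str.lower s) (String.singleton c) : Int)]) []]
  rw [PySem.List.foldl_append_singleton_eq_map]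
  simp only [List.nil_append]
  apply List.map_congr_left
  intro a _
  rw [PySem.Str.count_eq, PySem.Str.toList_lower, String.toList_singleton, pvCountSingleton]

theorem pvCountEraseIdx (t : List Char) (i : Nat) (h : i < t.length) (a : Char) :
    ((t.eraseIdx i).count a : Int) = (t.count a : Int) - if t[i] = a then 1 else 0 := by
  rw [List.eraseIdx_eq_take_drop_succ, List.count_append]
  have h2 : t.count a = (t.take i).count a + (t[i] :: t.drop (i + 1)).count a := by
    conv_lhs => rw [← List.take_append_drop i t]
    rw [List.count_append, List.getElem_cons_drop h]
  rw [h2, List.count_cons]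
  by_cases hc : t[i] = a <;> simp [hc] <;> omega

-- value inserted by A at index i
theorem pvAStep (s : String) (i : Nat) (h : i < (PySem.Chars.lower s.toList).length) :
    count_vector (PySem.Str.join ""
      ((((PySem.Chars.lower s.toList).eraseIdx i).map String.singleton)))
    = pvG (PySem.Chars.lower s.toList) ((PySem.Chars.lower s.toList)[i]) := by
  rw [pvCountVectorEq]
  unfold pvG
  have htl : (PySem.Str.join ""
      ((((PySem.Chars.lower s.toList).eraseIdx i).map String.singleton))).toList
      = (PySem.Chars.lower s.toList).eraseIdx i := by
    rw [PySem.Str.toList_join, List.map_map]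
    have hcomp : (String.toList ∘ String.singleton) = (fun c : Char => [c]) := by
      funext c; simp
    rw [hcomp]
    simpa using PySem.Chars.join_nil_singletons _
  rw [htl, pvLowerFix s.toList _ (List.eraseIdx_sublist _ _)]
  apply List.map_congr_left
  intro a _
  rw [pvCountEraseIdx _ _ h]
  by_cases hc : (PySem.Chars.lower s.toList)[i] = a
  · simp [hc]
  · simp [hc, Ne.symm hc]

-- the alphabet literal, elementwise
theorem pvAlphGet : ∀ j : Fin ("abcdefghijklmnopqrstuvwxyz".toList.length),
    ("abcdefghijklmnopqrstuvwxyz".toList.get j).toNat = 97 + j.val := by decide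

-- value inserted by B for character c
theorem pvBStep (s : String) (c : Char) :
    (PySem.List.enumerate (("abcdefghijklmnopqrstuvwxyz".toList.map
        (fun a => ((PySem.Chars.lower s.toList).count a : Int))))).map
      (fun q => if q.1 = (if 'a' ≤ c ∧ c ≤ 'z' then (c.toNat : Int) - 97 else -1)
                then q.2 - 1 else q.2)
    = pvG (PySem.Chars.lower s.toList) c := by
  unfold pvG
  apply List.ext_getElem
  · simp
  intro j hj1 hj2
  simp only [List.getElem_map]
  rw [PySem.List.getElem_enumerate]
  have hj : j < "abcdefghijklmnopqrstuvwxyz".toList.length := by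
    simpa using hj2
  have hj26 : j < 26 := by
    have h26 : "abcdefghijklmnopqrstuvwxyz".toList.length = 26 := by decide
    omega
  simp only [List.getElem_map]
  have hget : ("abcdefghijklmnopqrstuvwxyz".toList[j]'hj).toNat = 97 + j := by
    simpa using pvAlphGet ⟨j, hj⟩
  have ha : ('a' : Char).toNat = 97 := by decide
  have hz : ('z' : Char).toNat = 122 := by decide
  have hiff : ((0 + (j : Int)) = (if 'a' ≤ c ∧ c ≤ 'z' then (c.toNat : Int) - 97 else -1))
      ↔ ("abcdefghijklmnopqrstuvwxyz".toList[j]'hj = c) := by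
    by_cases hc : 'a' ≤ c ∧ c ≤ 'z'
    · rw [if_pos hc]
      obtain ⟨h1, h2⟩ := hc
      rw [pvCharLe, ha] at h1
      rw [pvCharLe, hz] at h2
      constructor
      · intro hh
        apply pvCharExt
        rw [hget]; omega
      · intro hh
        have := congrArg Char.toNat hh
        rw [hget] at this
        omega
    · rw [if_neg hc]
      constructor
      · intro hh; omega
      · intro hh
        exfalso
        apply hc
        have := congrArg Char.toNat hh
        rw [hget] at this
        rw [pvCharLe, pvCharLe, ha, hz]
        omega
  have key : (if (0 + (j : Int)) = (if 'a' ≤ c ∧ c ≤ 'z' then (c.toNat : Int) - 97 else -1)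
        then ((PySem.Chars.lower s.toList).count ("abcdefghijklmnopqrstuvwxyz".toList[j]'hj) : Int) - 1
        else ((PySem.Chars.lower s.toList).count ("abcdefghijklmnopqrstuvwxyz".toList[j]'hj) : Int))
      = ((PySem.Chars.lower s.toList).count ("abcdefghijklmnopqrstuvwxyz".toList[j]'hj) : Int)
        - if ("abcdefghijklmnopqrstuvwxyz".toList[j]'hj) = c then 1 else 0 := by
    by_cases hac : ("abcdefghijklmnopqrstuvwxyz".toList[j]'hj) = c
    · rw [if_pos (hiff.mpr hac), if_pos hac]
    · rw [if_neg (fun hh => hac (hiff.mp hh)), if_neg hac]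
      omega
  exact key

-- inserting an already-present binding is a no-op
theorem pvInsertNoop {ν : Type} (d : PySem.Dict String ν) (k : String) (v : ν)
    (h : d.get? k = some v) (hn : d.keys.Nodup) : d.insert k v = d := by
  apply PySem.Dict.ext
  have hc : d.contains k = true := by
    rw [PySem.Dict.contains_eq_isSome_get?, h]; rfl
  rw [PySem.Dict.items_insert_of_contains d v hc]
  apply (List.map_congr_left ?_).trans (List.map_id d.items)
  intro p hp
  by_cases hk : (p.1 == k) = true
  · rw [if_pos hk]
    have hpk : p.1 = k := by simpa using hk
    have hmem : (k, p.2) ∈ d.items := by rw [← hpk]; exact hp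
    have hg := PySem.Dict.get?_of_mem_items d hmem hn
    rw [h] at hg
    have hv : p.2 = v := by injection hg.symm
    rw [← hpk, ← hv]
    rfl
  · rw [if_neg hk]
    rfl


-- the Set.ofList fold relative to a seen-prefix is first-occurrence dedup
theorem pvD1 (l : List Char) : ∀ seen : List Char,
    l.foldl PySem.Set.add seen = seen ++ pvDdA seen l := by
  induction l with
  | nil => intro seen; simp [pvDdA]
  | cons c l ih =>
    intro seen
    simp only [List.foldl_cons, pvDdA]
    by_cases h : PySem.Set.contains seen c = true
    · rw [if_pos h]
      have hadd : PySem.Set.add seen c = seen := by unfold PySem.Set.add; rw [if_pos h]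
      rw [hadd, ih]
    · rw [if_neg h]
      have hadd : PySem.Set.add seen c = seen ++ [c] := by unfold PySem.Set.add; rw [if_neg h]
      rw [hadd, ih, List.append_assoc]
      rfl

-- folding the insert over all characters = folding it over the unseen first occurrences
theorem pvD2 (t : List Char) : ∀ (l seen : List Char) (d : PySem.Dict String (List Int)),
    d.keys.Nodup →
    (∀ c ∈ seen, d.get? (String.singleton c) = some (pvG t c)) →
    l.foldl (pvIns t) d = (pvDdA seen l).foldl (pvIns t) d := by
  intro l
  induction l with
  | nil => intro seen d _ _; simp [pvDdA]
  | cons c l ih =>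
    intro seen d hn hinv
    simp only [List.foldl_cons, pvDdA]
    by_cases h : PySem.Set.contains seen c = true
    · rw [if_pos h]
      have hmem : c ∈ seen := by
        unfold PySem.Set.contains at h; simpa using h
      have hnoop : pvIns t d c = d := pvInsertNoop d _ _ (hinv c hmem) hn
      rw [hnoop]
      exact ih seen d hn hinv
    · rw [if_neg h]
      simp only [List.foldl_cons]
      apply ih (seen ++ [c]) (pvIns t d c)
      · exact PySem.Dict.nodup_keys_insert d _ _ hn
      · intro c' hc'
        unfold pvIns
        rw [PySem.Dict.get?_insert]
        rcases List.mem_append.mp hc' with hc1 | hc2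
        · by_cases he : String.singleton c' = String.singleton c
          · have : c' = c := pvSingletonInj _ _ he
            subst this
            rw [if_pos rfl]
          · rw [if_neg he]
            exact hinv c' hc1
        · have : c' = c := by simpa using hc2
          subst this
          rw [if_pos rfl]

-- A's dictionary-building loop, as a fold of pvIns over the lowered characters
theorem pvAFold (s : String) :
    (PySem.List.pyRange 0 (PySem.Str.len s) 1).foldl
      (fun d i =>
        match PySem.List.pop? (PySem.Str.lower s).toList i with
        | some (key, rest) =>
            d.insert (String.singleton key)
              (count_vector (PySem.Str.join "" (rest.map String.singleton)))
        | none => d)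
      PySem.Dict.empty
    = (PySem.Chars.lower s.toList).foldl (pvIns (PySem.Chars.lower s.toList)) PySem.Dict.empty := by
  have hlen : PySem.Str.len s = (((PySem.Chars.lower s.toList)).length : Int) := by
    rw [PySem.Str.len_eq]
    unfold PySem.Chars.lower
    simp
  rw [hlen]
  rw [PySem.List.foldl_congr_mem (PySem.List.pyRange 0 ((PySem.Chars.lower s.toList).length : Int) 1)
    (fun d i =>
        match PySem.List.pop? (PySem.Str.lower s).toList i with
        | some (key, rest) =>
            d.insert (String.singleton key)
              (count_vector (PySem.Str.join "" (rest.map String.singleton)))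
        | none => d)
    (fun d i => pvIns (PySem.Chars.lower s.toList) d
      (PySem.List.pyGetD (PySem.Chars.lower s.toList) i 'a'))
    PySem.Dict.empty ?_]
  · exact PySem.List.foldl_pyRange_zero_pyGetD' (PySem.Chars.lower s.toList) 'a'
      (pvIns (PySem.Chars.lower s.toList)) PySem.Dict.empty
  · intro d i hi
    rw [PySem.List.mem_pyRange_one] at hi
    obtain ⟨h0, h1⟩ := hi
    have hlt : i.toNat < (PySem.Chars.lower s.toList).length := by omega
    have hi' : i = ((i.toNat : Nat) : Int) := by omega
    rw [hi']
    simp only [PySem.Str.toList_lower]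
    rw [PySem.List.pop?_natCast _ _ hlt, PySem.List.pyGetD_natCast, List.getD_eq_getElem _ _ hlt]
    show d.insert (String.singleton ((PySem.Chars.lower s.toList)[i.toNat]'hlt))
        (count_vector (PySem.Str.join ""
          ((((PySem.Chars.lower s.toList).eraseIdx i.toNat).map String.singleton))))
      = pvIns (PySem.Chars.lower s.toList) d ((PySem.Chars.lower s.toList)[i.toNat]'hlt)
    unfold pvIns
    rw [pvAStep s _ hlt]

-- ===== VERDICT (by name: the statement is the Claim_ definition above) =====
theorem loo_features_spec : Claim_equal_loo_features := by
  intro s _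
  unfold Spec_loo_features loo_features loo_features_alt
  show (((PySem.List.pyRange 0 (PySem.Str.len s) 1).foldl
      (fun d i =>
        match PySem.List.pop? (PySem.Str.lower s).toList i with
        | some (key, rest) =>
            d.insert (String.singleton key)
              (count_vector (PySem.Str.join "" (rest.map String.singleton)))
        | none => d)
      PySem.Dict.empty).insert "none" (count_vector s)).items
    = (((PySem.List.dedup (PySem.Str.lower s).toList).foldl
      (fun d c =>
        d.insert (String.singleton c)
          ((PySem.List.enumerate ("abcdefghijklmnopqrstuvwxyz".toList.map
             (fun c => (PySem.Str.count (PySem.Str.lower s) (String.singleton c) : Int)))).map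
            (fun q => if q.1 = (if 'a' ≤ c ∧ c ≤ 'z' then (c.toNat : Int) - 97 else -1)
                      then q.2 - 1 else q.2)))
      PySem.Dict.empty).insert "none" ("abcdefghijklmnopqrstuvwxyz".toList.map
        (fun c => (PySem.Str.count (PySem.Str.lower s) (String.singleton c) : Int)))).items
  have hBfull : "abcdefghijklmnopqrstuvwxyz".toList.map
      (fun c => (PySem.Str.count (PySem.Str.lower s) (String.singleton c) : Int))
      = "abcdefghijklmnopqrstuvwxyz".toList.map
        (fun a => ((PySem.Chars.lower s.toList).count a : Int)) := by
    apply List.map_congr_left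
    intro a _
    rw [PySem.Str.count_eq, PySem.Str.toList_lower, String.toList_singleton, pvCountSingleton]
  rw [pvAFold s, pvCountVectorEq s, hBfull]
  rw [PySem.List.foldl_congr_mem ((PySem.List.dedup (PySem.Str.lower s).toList))
    (fun d c =>
        d.insert (String.singleton c)
          ((PySem.List.enumerate ("abcdefghijklmnopqrstuvwxyz".toList.map
             (fun a => ((PySem.Chars.lower s.toList).count a : Int)))).map
            (fun q => if q.1 = (if 'a' ≤ c ∧ c ≤ 'z' then (c.toNat : Int) - 97 else -1)
                      then q.2 - 1 else q.2)))
    (pvIns (PySem.Chars.lower s.toList))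
    PySem.Dict.empty
    (fun d c _ => by beta_reduce; unfold pvIns; rw [pvBStep s c])]
  rw [PySem.List.dedup_eq_ofList, PySem.Set.ofList_eq_foldl, PySem.Str.toList_lower, pvD1]
  simp only [List.nil_append]
  rw [← pvD2 (PySem.Chars.lower s.toList) (PySem.Chars.lower s.toList) []
    PySem.Dict.empty PySem.Dict.nodup_keys_empty (by simp)]
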